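-- pv_equiv track=rewrite | github.com/netpaladinx/myzonelab | myzonecv/core/utils/options.py | collect_options
-- ===== SOURCE A (Python) =====
-- def collect_options(opts, prefix, share_remaining=False):
--     assert isinstance(opts, dict)
--     if isinstance(prefix, str):
--         prefix = [prefix]
--     assert isinstance(prefix, (list, tuple))
--
--     collected = [{} for _ in prefix]
--     for key, val in opts.items():
--         for i, s in enumerate(prefix):
--             if key.startswith(s):
--                 k = key[len(s):]
--                 collected[i][k] = val
--                 break
--         else:
--             if share_remaining:
--                 for col in collected:
--                     col[key] = val
--     return collected
-- ===== SOURCE B (Python) =====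
-- def collect_options(opts, prefix, share_remaining=False):
--     assert isinstance(opts, dict)
--     if isinstance(prefix, str):
--         prefix = [prefix]
--     assert isinstance(prefix, (list, tuple))
--
--     # One tagging pass: each entry gets the index of the first matching prefix (or None),
--     # then each bucket is materialised independently by a dict comprehension.
--     tagged = [(next((i for i, s in enumerate(prefix) if key.startswith(s)), None), key, val)
--               for key, val in opts.items()]
--     return [{(key[len(prefix[i]):] if t == i else key): val
--              for t, key, val in tagged
--              if t == i or (t is None and share_remaining)}
--             for i in range(len(prefix))]
-- ===== Notes on version B (the rewrite author's own statement) =====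
-- stated objective: alternative
-- what changed: Instead of one pass over the entries that mutates a list of bucket dicts via an enumerate-with-break inner loop, B first computes each entry's first-matching-prefix tag in one pass and then builds every bucket independently with a dict comprehension over the tagged entries.
import Mathlib
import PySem

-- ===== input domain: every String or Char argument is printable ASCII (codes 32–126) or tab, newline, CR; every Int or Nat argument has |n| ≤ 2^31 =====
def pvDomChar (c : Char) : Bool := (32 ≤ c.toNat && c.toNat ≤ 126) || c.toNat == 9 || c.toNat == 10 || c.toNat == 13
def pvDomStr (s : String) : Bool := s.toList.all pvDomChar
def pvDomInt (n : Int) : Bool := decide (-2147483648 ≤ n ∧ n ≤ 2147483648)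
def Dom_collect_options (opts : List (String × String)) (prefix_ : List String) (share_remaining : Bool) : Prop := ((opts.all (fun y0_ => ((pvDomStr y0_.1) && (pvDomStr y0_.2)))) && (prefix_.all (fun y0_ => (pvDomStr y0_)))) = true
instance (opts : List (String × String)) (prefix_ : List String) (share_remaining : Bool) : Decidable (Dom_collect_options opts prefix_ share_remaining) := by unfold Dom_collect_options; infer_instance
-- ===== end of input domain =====

-- B changes the decomposition: A makes one pass over the entries mutating all buckets with an
-- inner enumerate-with-break loop; B tags each entry with its first matching prefix index once,
-- then builds each bucket independently from the tagged list (objective: alternative).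

-- ===== PORT A =====
-- key[len(s):]
def pvStrip (key s : String) : String :=
  PySem.Str.slice key (some (PySem.Str.len s)) none

-- the inner 'for i, s in enumerate(prefix): … break / else: …' body for one (key, val)
def pvA_inner (share : Bool) (key val : String) :
    List String → Nat → List (PySem.Dict String String) → List (PySem.Dict String String)
  | [], _, collected =>
      if share then collected.map (fun col => col.insert key val) else collected
  | s :: rest, i, collected =>
      if PySem.Str.startswith key s then
        collected.set i ((collected.getD i PySem.Dict.empty).insert (pvStrip key s) val)
      else
        pvA_inner share key val rest (i + 1) collected

def collect_options (opts : List (String × String)) (prefix_ : List String) (share_remaining : Bool) : List (List (String × String)) :=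
  let collected : List (PySem.Dict String String) := prefix_.map (fun _ => PySem.Dict.empty)
  (opts.foldl (fun collected kv => pvA_inner share_remaining kv.1 kv.2 prefix_ 0 collected) collected).map
    PySem.Dict.items

-- ===== PORT B =====
-- next((i for i, s in enumerate(prefix) if key.startswith(s)), None)
def pvFirstMatch (key : String) : List String → Nat → Option Nat
  | [], _ => none
  | s :: rest, i => if PySem.Str.startswith key s then some i else pvFirstMatch key rest (i + 1)

-- one step of the per-bucket dict comprehension
def pvB_step (prefix_ : List String) (share : Bool) (i : Nat)
    (d : PySem.Dict String String) (t : Option Nat × String × String) : PySem.Dict String String :=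
  match t with
  | (some j, key, val) =>
      if j = i then d.insert (pvStrip key (prefix_.getD i "")) val else d
  | (none, key, val) => if share then d.insert key val else d

def collect_options_alt (opts : List (String × String)) (prefix_ : List String) (share_remaining : Bool) : List (List (String × String)) :=
  let tagged := opts.map (fun kv => (pvFirstMatch kv.1 prefix_ 0, kv.1, kv.2))
  (List.range prefix_.length).map (fun i =>
    (tagged.foldl (pvB_step prefix_ share_remaining i) PySem.Dict.empty).items)

-- ===== PRECONDITION & SPEC =====
def Spec_collect_options (opts : List (String × String)) (prefix_ : List String) (share_remaining : Bool) (out : List (List (String × String))) : Prop := out = collect_options_alt opts prefix_ share_remaining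
instance (opts : List (String × String)) (prefix_ : List String) (share_remaining : Bool) (out : List (List (String × String))) : Decidable (Spec_collect_options opts prefix_ share_remaining out) := by unfold Spec_collect_options; infer_instance

-- ===== CLAIM (what is proved, stated in full; the proofs are below) =====
def Claim_equal_collect_options : Prop := ∀ (opts : List (String × String)) (prefix_ : List String) (share_remaining : Bool), Dom_collect_options opts prefix_ share_remaining → Spec_collect_options opts prefix_ share_remaining (collect_options opts prefix_ share_remaining)

-- ===== LEMMAS AND PROOFS =====

theorem pvFirstMatch_bounds {key : String} :
    ∀ {ps : List String} {i j : Nat}, pvFirstMatch key ps i = some j → i ≤ j ∧ j < i + ps.length := by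
  intro ps
  induction ps with
  | nil => intro i j h; simp [pvFirstMatch] at h
  | cons s rest ih =>
    intro i j h
    simp only [pvFirstMatch] at h
    split at h
    · cases h; simp only [List.length_cons]; omega
    · obtain ⟨h1, h2⟩ := ih h; simp only [List.length_cons]; omega

theorem pvA_inner_eq (share : Bool) (key val : String) :
    ∀ (ps : List String) (i : Nat) (collected : List (PySem.Dict String String)),
      pvA_inner share key val ps i collected =
        match pvFirstMatch key ps i with
        | some j =>
            collected.set j ((collected.getD j PySem.Dict.empty).insert (pvStrip key (ps.getD (j - i) "")) val)
        | none => if share then collected.map (fun col => col.insert key val) else collected := by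
  intro ps
  induction ps with
  | nil => intro i collected; simp [pvA_inner, pvFirstMatch]
  | cons s rest ih =>
    intro i collected
    simp only [pvA_inner, pvFirstMatch]
    split
    · simp
    · rw [ih]
      cases h : pvFirstMatch key rest (i + 1) with
      | none => simp
      | some j =>
        have hb := pvFirstMatch_bounds h
        have : j - i = (j - (i + 1)) + 1 := by omega
        simp [this]

theorem pvA_inner_length (share : Bool) (key val : String)
    (ps : List String) (i : Nat) (collected : List (PySem.Dict String String)) :
    (pvA_inner share key val ps i collected).length = collected.length := by
  rw [pvA_inner_eq]
  cases pvFirstMatch key ps i <;> simp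
  split <;> simp

-- element i of A's per-entry update equals B's per-entry step on element i
theorem pvA_inner_getD (share : Bool) (key val : String)
    (prefix_ : List String) (collected : List (PySem.Dict String String))
    (hlen : collected.length = prefix_.length) (i : Nat) (hi : i < prefix_.length) :
    (pvA_inner share key val prefix_ 0 collected).getD i PySem.Dict.empty =
      pvB_step prefix_ share i (collected.getD i PySem.Dict.empty) (pvFirstMatch key prefix_ 0, key, val) := by
  rw [pvA_inner_eq]
  cases h : pvFirstMatch key prefix_ 0 with
  | none =>
    simp only [pvB_step]
    split
    · rw [List.getD_eq_getElem?_getD, List.getElem?_map]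
      rw [List.getD_eq_getElem?_getD]
      have : i < collected.length := by omega
      simp [List.getElem?_eq_getElem this]
    · rfl
  | some j =>
    have hb := pvFirstMatch_bounds h
    have hj : j < collected.length := by omega
    simp only [pvB_step, Nat.sub_zero]
    by_cases hij : j = i
    · subst hij
      simp [List.getD_eq_getElem?_getD, List.getElem?_set_self hj]
    · rw [List.getD_eq_getElem?_getD, List.getElem?_set_ne (by omega), ← List.getD_eq_getElem?_getD]
      simp [hij]

-- the main invariant: pointwise, folding A's step equals folding B's per-bucket step
theorem pv_fold_eq (prefix_ : List String) (share : Bool) :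
    ∀ (opts : List (String × String)) (collected : List (PySem.Dict String String)),
      collected.length = prefix_.length →
      ∀ i, i < prefix_.length →
        (opts.foldl (fun collected kv => pvA_inner share kv.1 kv.2 prefix_ 0 collected) collected).getD i PySem.Dict.empty =
          opts.foldl (fun d kv => pvB_step prefix_ share i d (pvFirstMatch kv.1 prefix_ 0, kv.1, kv.2))
            (collected.getD i PySem.Dict.empty) := by
  intro opts
  induction opts with
  | nil => intro collected _ i _; rfl
  | cons kv rest ih =>
    intro collected hlen i hi
    simp only [List.foldl_cons]
    rw [ih _ (by rw [pvA_inner_length]; exact hlen) i hi,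
        pvA_inner_getD share kv.1 kv.2 prefix_ collected hlen i hi]

theorem pv_fold_length (prefix_ : List String) (share : Bool) :
    ∀ (opts : List (String × String)) (collected : List (PySem.Dict String String)),
      (opts.foldl (fun collected kv => pvA_inner share kv.1 kv.2 prefix_ 0 collected) collected).length =
        collected.length := by
  intro opts
  induction opts with
  | nil => intro collected; rfl
  | cons kv rest ih =>
    intro collected
    simp only [List.foldl_cons]
    rw [ih, pvA_inner_length]

-- ===== VERDICT (by name: the statement is the Claim_ definition above) =====
theorem collect_options_spec : Claim_equal_collect_options := by
  intro opts prefix_ share _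
  unfold Spec_collect_options collect_options collect_options_alt
  simp only []
  set collected0 : List (PySem.Dict String String) := prefix_.map (fun _ => PySem.Dict.empty) with hc0
  have hlen0 : collected0.length = prefix_.length := by simp [hc0]
  have hLlen : (opts.foldl (fun collected kv => pvA_inner share kv.1 kv.2 prefix_ 0 collected) collected0).length = prefix_.length := by
    rw [pv_fold_length]; exact hlen0
  apply List.ext_getElem
  · simp [hLlen]
  · intro i h1 h2
    simp only [List.getElem_map, List.getElem_range]
    have hi : i < prefix_.length := by simpa [hLlen] using h1
    have hA : (opts.foldl (fun collected kv => pvA_inner share kv.1 kv.2 prefix_ 0 collected) collected0)[i] =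
        (opts.foldl (fun collected kv => pvA_inner share kv.1 kv.2 prefix_ 0 collected) collected0).getD i PySem.Dict.empty := by
      rw [List.getD_eq_getElem?_getD, List.getElem?_eq_getElem]; rfl
    rw [hA, pv_fold_eq prefix_ share opts collected0 hlen0 i hi]
    have hc0i : collected0.getD i PySem.Dict.empty = PySem.Dict.empty := by
      rw [hc0, List.getD_eq_getElem?_getD, List.getElem?_map]
      simp [List.getElem?_eq_getElem hi]
    rw [hc0i, List.foldl_map]
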